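-- pv_equiv track=rewrite | github.com/darkwud/qualgorithms | GroversSearch/test_tasks.py | f_col_constraints
-- ===== SOURCE A (Python) =====
-- def f_col_constraints(args: list[bool], col_constr: list[int]):
--     C = len(col_constr)
--     R = len(args) // C
--     for col in range(C):
--         sum = 0
--         for row in range(R):
--             sum += args[row * C + col]
--         if sum != col_constr[col]:
--             return False
--     return True
-- ===== SOURCE B (Python) =====
-- def f_col_constraints(args: list[bool], col_constr: list[int]):
--     # Row-major single pass: tally all column sums at once, then compare the table.
--     C = len(col_constr)
--     R = len(args) // C
--     sums = [0] * C
--     for idx in range(R * C):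
--         sums[idx % C] += args[idx]
--     return sums == col_constr
-- ===== Notes on version B (the rewrite author's own statement) =====
-- stated objective: alternative
-- what changed: Replaces the column-outer nested scan with early exit by a single row-major pass that tallies all column sums into a table and then compares the whole table to the constraints.
import Mathlib
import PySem

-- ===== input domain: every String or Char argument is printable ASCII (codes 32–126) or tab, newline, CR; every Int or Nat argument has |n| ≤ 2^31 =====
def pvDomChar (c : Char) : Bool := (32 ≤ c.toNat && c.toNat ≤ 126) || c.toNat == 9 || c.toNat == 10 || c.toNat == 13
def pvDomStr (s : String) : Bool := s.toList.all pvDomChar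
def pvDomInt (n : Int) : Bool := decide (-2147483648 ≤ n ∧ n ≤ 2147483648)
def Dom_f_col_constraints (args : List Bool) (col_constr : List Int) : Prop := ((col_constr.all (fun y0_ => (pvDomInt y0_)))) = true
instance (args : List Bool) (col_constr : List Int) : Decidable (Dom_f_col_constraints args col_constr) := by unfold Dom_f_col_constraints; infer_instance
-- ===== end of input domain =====

-- B replaces A's column-outer nested scan (with early exit) by one row-major pass
-- that tallies all column sums into a table and then compares the table; same cost.


-- ===== PORT A =====
-- inner loop: sum += args[row * C + col]; the index row*C+col is always < len args
-- (row < R = len//C, col < C), so getD is exact; bools count as 0/1 as in Python.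
def aColSum (args : List Bool) (C R col : Nat) : Int :=
  (List.range R).foldl
    (fun s row => s + (if args.getD (row * C + col) false then 1 else 0)) 0

-- outer loop over range(C) with Python's early `return False`
def aLoop (args : List Bool) (col_constr : List Int) (C R : Nat) : List Nat → Bool
  | [] => true
  | col :: rest =>
      if aColSum args C R col ≠ col_constr.getD col 0 then false
      else aLoop args col_constr C R rest

-- Pre_ excludes col_constr = [] (C = 0), where Python's `len(args) // C` raises; Nat
-- division here matches Python's `//` on these nonnegative lengths whenever C ≠ 0.
def f_col_constraints (args : List Bool) (col_constr : List Int) : Bool :=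
  let C := col_constr.length
  let R := args.length / C
  aLoop args col_constr C R (List.range C)

-- ===== PORT B =====
-- one row-major pass: sums[idx % C] += args[idx] for idx in range(R*C), then compare
def f_col_constraints_alt (args : List Bool) (col_constr : List Int) : Bool :=
  let C := col_constr.length
  let R := args.length / C
  let sums := (List.range (R * C)).foldl
    (fun sums idx =>
      sums.set (idx % C) (sums.getD (idx % C) 0 + (if args.getD idx false then 1 else 0)))
    (List.replicate C (0 : Int))
  decide (sums = col_constr)

-- ===== PRECONDITION & SPEC =====
-- Pre_ excludes exactly col_constr = [], where Python A raises ZeroDivisionError.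
def Pre_f_col_constraints (args : List Bool) (col_constr : List Int) : Prop :=
  col_constr ≠ []
instance (args : List Bool) (col_constr : List Int) : Decidable (Pre_f_col_constraints args col_constr) := by unfold Pre_f_col_constraints; infer_instance

def pvWitness_f_col_constraints : List Bool × List Int := ([true, false], [1, 0])

def Spec_f_col_constraints (args : List Bool) (col_constr : List Int) (out : Bool) : Prop := out = f_col_constraints_alt args col_constr
instance (args : List Bool) (col_constr : List Int) (out : Bool) : Decidable (Spec_f_col_constraints args col_constr out) := by unfold Spec_f_col_constraints; infer_instance

-- ===== CLAIM (what is proved, stated in full; the proofs are below) =====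
def Claim_equal_f_col_constraints : Prop := ∀ (args : List Bool) (col_constr : List Int), Dom_f_col_constraints args col_constr → Pre_f_col_constraints args col_constr → Spec_f_col_constraints args col_constr (f_col_constraints args col_constr)

-- ===== LEMMAS AND PROOFS =====

-- the 0/1 value Python adds for args[idx]
def pvB (args : List Bool) (idx : Nat) : Int := if args.getD idx false then 1 else 0

-- running column tally: pvCnt args C n j = sum of pvB args idx over idx < n with idx % C = j
def pvCnt (args : List Bool) (C : Nat) : Nat → Nat → Int
  | 0, _ => 0
  | n+1, j => pvCnt args C n j + if n % C = j then pvB args n else 0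

lemma aColSum_succ (args : List Bool) (C R col : Nat) :
    aColSum args C (R + 1) col = aColSum args C R col + pvB args (R * C + col) := by
  simp [aColSum, pvB, List.range_succ]

-- the tally list after processing range n (B's fold, as a named helper for the proofs)
def pvF (args : List Bool) (C n : Nat) : List Int :=
  (List.range n).foldl
    (fun sums idx =>
      sums.set (idx % C) (sums.getD (idx % C) 0 + (if args.getD idx false then 1 else 0)))
    (List.replicate C (0 : Int))

lemma pvF_succ (args : List Bool) (C n : Nat) :
    pvF args C (n + 1) =
      (pvF args C n).set (n % C) ((pvF args C n).getD (n % C) 0 + pvB args n) := by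
  simp [pvF, pvB, List.range_succ]

lemma pvF_len (args : List Bool) (C n : Nat) : (pvF args C n).length = C := by
  induction n with
  | zero => simp [pvF]
  | succ n ih => rw [pvF_succ, List.length_set, ih]

lemma pvF_getD (args : List Bool) (C n j : Nat) (hj : j < C) :
    (pvF args C n).getD j 0 = pvCnt args C n j := by
  induction n with
  | zero => simp [pvF, pvCnt, List.getD]
  | succ n ih =>
      have hC0 : 0 < C := Nat.pos_of_ne_zero (by omega)
      have hm : n % C < C := Nat.mod_lt _ hC0
      rw [pvF_succ]
      have hlen : j < (pvF args C n).length := by rw [pvF_len]; exact hj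
      have hlen' : n % C < (pvF args C n).length := by rw [pvF_len]; exact hm
      rw [List.getD_eq_getElem _ _ (by rw [List.length_set]; exact hlen)]
      rw [List.getElem_set]
      by_cases h : n % C = j
      · simp only [h, if_pos]
        rw [ih]
        subst h
        simp [pvCnt]
      · simp only [if_neg h]
        rw [← List.getD_eq_getElem _ _ hlen, ih]
        simp [pvCnt, h]

lemma cnt_offset (args : List Bool) (C r j : Nat) (hj : j < C) :
    ∀ t, t ≤ C →
      pvCnt args C (r * C + t) j =
        pvCnt args C (r * C) j + (if j < t then pvB args (r * C + j) else 0) := by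
  intro t
  induction t with
  | zero => simp
  | succ t ih =>
      intro ht
      have ht' : t < C := Nat.lt_of_succ_le ht
      have hmod : (r * C + t) % C = t := by
        rw [Nat.mul_comm r C, Nat.mul_add_mod]
        exact Nat.mod_eq_of_lt ht'
      have : r * C + (t + 1) = (r * C + t) + 1 := by ring
      rw [this]
      show pvCnt args C (r * C + t) j + _ = _
      rw [ih (Nat.le_of_lt ht'), hmod]
      by_cases h : t = j
      · subst h
        simp
      · by_cases h2 : j < t
        · have : j < t + 1 := Nat.lt_succ_of_lt h2
          simp [h, h2, this]
        · have : ¬ j < t + 1 := by omega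
          simp [h, h2, this]

lemma cnt_add_block (args : List Bool) (C : Nat) (r j : Nat) (hj : j < C) :
    pvCnt args C (r * C + C) j = pvCnt args C (r * C) j + pvB args (r * C + j) := by
  rw [cnt_offset args C r j hj C (le_refl C)]
  simp [hj]

lemma cnt_eq_colSum (args : List Bool) (C : Nat) (R j : Nat) (hj : j < C) :
    pvCnt args C (R * C) j = aColSum args C R j := by
  induction R with
  | zero => simp [pvCnt, aColSum]
  | succ r ih =>
      have : (r + 1) * C = r * C + C := by ring
      rw [this, cnt_add_block args C r j hj, ih, aColSum_succ]

lemma aLoop_iff (args : List Bool) (col_constr : List Int) (C R : Nat) (l : List Nat) :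
    aLoop args col_constr C R l = true ↔
      ∀ col ∈ l, aColSum args C R col = col_constr.getD col 0 := by
  induction l with
  | nil => simp [aLoop]
  | cons c rest ih =>
      simp only [aLoop]
      split_ifs with h
      · simp only [false_iff]
        intro hall
        exact h (hall c (List.mem_cons_self ..))
      · rw [ih]
        rw [not_not] at h
        constructor
        · intro hr col hc
          rcases List.mem_cons.mp hc with rfl | hc
          · exact h
          · exact hr col hc
        · intro hall col hc
          exact hall col (List.mem_cons_of_mem _ hc)

-- ===== VERDICT (by name: the statement is the Claim_ definition above) =====
lemma alt_eq_decide (args : List Bool) (col_constr : List Int) :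
    f_col_constraints_alt args col_constr =
      decide (pvF args col_constr.length
        (args.length / col_constr.length * col_constr.length) = col_constr) := rfl

theorem f_col_constraints_spec : Claim_equal_f_col_constraints := by
  intro args col_constr _hdom _hpre
  unfold Spec_f_col_constraints
  rw [Bool.eq_iff_iff]
  set C := col_constr.length with hC
  set R := args.length / C with hR
  rw [show f_col_constraints args col_constr = aLoop args col_constr C R (List.range C) from rfl]
  rw [aLoop_iff, alt_eq_decide, decide_eq_true_iff]
  constructor
  · intro hA
    apply List.ext_getElem (by rw [pvF_len])
    intro i h1 h2
    have hi : i < C := by rw [pvF_len] at h1; exact h1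
    rw [← List.getD_eq_getElem _ (0 : Int) h1, pvF_getD args C _ i hi,
        cnt_eq_colSum args C R i hi]
    have := hA i (List.mem_range.mpr hi)
    rw [this, List.getD_eq_getElem _ _ h2]
  · intro hB col hcol
    have hi : col < C := List.mem_range.mp hcol
    have h2 : col < col_constr.length := hi
    have h1 : col < (pvF args C (R * C)).length := by rw [pvF_len]; exact hi
    have := congrArg (fun l => l.getD col (0 : Int)) hB
    simp only at this
    rw [pvF_getD args C _ col hi, cnt_eq_colSum args C R col hi] at this
    exact this
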